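-- pv_equiv track=rewrite | github.com/Velascat/OperationsCenter | src/control_plane/observer/collectors/architecture_signal.py | _compute_max_import_depth
-- ===== SOURCE A (Python) =====
-- def _compute_max_import_depth(
--     graph: dict[str, set[str]], module_set: set[str]
-- ) -> int:
--     """BFS from each module to find the longest chain within known modules."""
--     max_depth = 0
--     for start in module_set:
--         visited: set[str] = {start}
--         frontier = [start]
--         depth = 0
--         while frontier:
--             next_frontier: list[str] = []
--             for mod in frontier:
--                 for dep in graph.get(mod, set()):
--                     if dep in module_set and dep not in visited:
--                         visited.add(dep)
--                         next_frontier.append(dep)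
--             if next_frontier:
--                 depth += 1
--             frontier = next_frontier
--         max_depth = max(max_depth, depth)
--     return max_depth
-- ===== SOURCE B (Python) =====
-- def _compute_max_import_depth(graph, module_set):
--     """Set-saturation per start: grow the in-set reachable closure round by
--     round and count the strict-growth rounds (no frontier bookkeeping)."""
--     max_depth = 0
--     for start in module_set:
--         visited = {start}
--         depth = 0
--         for _ in range(len(module_set)):
--             new = {dep
--                    for mod in visited
--                    for dep in graph.get(mod, set())
--                    if dep in module_set and dep not in visited}
--             if not new:
--                 break
--             visited |= new
--             depth += 1
--         max_depth = max(max_depth, depth)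
--     return max_depth
-- ===== Notes on version B (the rewrite author's own statement) =====
-- stated objective: alternative
-- what changed: Replaces the frontier/next-frontier layered BFS with a round-based set saturation: each round recomputes the in-set neighbours of the whole visited set as one set comprehension and counts rounds that strictly grow it, so no frontier list or per-layer state is kept (it trades rescanning visited each round for the simpler state).
import Mathlib
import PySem

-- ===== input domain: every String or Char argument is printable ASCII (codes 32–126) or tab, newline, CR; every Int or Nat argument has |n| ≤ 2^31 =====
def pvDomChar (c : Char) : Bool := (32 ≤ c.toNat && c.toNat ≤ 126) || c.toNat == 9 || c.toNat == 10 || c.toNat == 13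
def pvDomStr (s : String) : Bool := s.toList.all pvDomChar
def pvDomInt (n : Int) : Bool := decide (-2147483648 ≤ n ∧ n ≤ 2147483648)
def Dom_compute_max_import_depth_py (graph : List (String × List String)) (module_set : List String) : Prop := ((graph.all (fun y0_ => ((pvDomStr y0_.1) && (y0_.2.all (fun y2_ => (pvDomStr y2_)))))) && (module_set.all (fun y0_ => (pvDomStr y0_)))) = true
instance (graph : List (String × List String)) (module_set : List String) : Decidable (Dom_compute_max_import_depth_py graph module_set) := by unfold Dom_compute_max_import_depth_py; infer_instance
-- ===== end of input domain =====

-- B replaces the layered frontier BFS by a round-based set saturation (count strict-growth rounds); alternative decomposition, same results.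


-- ===== PORT A =====
-- graph.get(mod, set()) : first-match association-list lookup with empty-set default
def depGet (graph : List (String × List String)) (m : String) : List String :=
  (PySem.Dict.mk graph).getD m []

-- body of the innermost 'for dep in graph.get(mod, set())' loop of A (state = (visited, next_frontier))
def visitDep (module_set : List String) (st : PySem.Set String × List String) (dep : String) :
    PySem.Set String × List String :=
  if dep ∈ module_set ∧ dep ∉ st.1 then (PySem.Set.add st.1 dep, st.2 ++ [dep]) else st

-- 'for mod in frontier: for dep in …'
def visitMod (graph : List (String × List String)) (module_set : List String)
    (st : PySem.Set String × List String) (m : String) : PySem.Set String × List String :=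
  (depGet graph m).foldl (visitDep module_set) st

-- one round of A's while loop: returns (visited, next_frontier)
def stepA (graph : List (String × List String)) (module_set : List String)
    (visited : PySem.Set String) (frontier : List String) : PySem.Set String × List String :=
  frontier.foldl (visitMod graph module_set) (visited, [])

-- characterization of the inner loops, needed for loopA's termination (and used again in the equivalence proof)
theorem visitMod_spec (module_set : List String) (deps : List String) :
    ∀ (v : PySem.Set String) (nf : List String),
      ∃ d, deps.foldl (visitDep module_set) (v, nf) = (v ++ d, nf ++ d) ∧
        (∀ x ∈ d, x ∈ module_set ∧ x ∉ v) ∧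
        (∀ x, (x ∈ v ∨ x ∈ d) ↔ (x ∈ v ∨ (x ∈ module_set ∧ x ∈ deps))) := by
  induction deps with
  | nil => intro v nf; exact ⟨[], by simp⟩
  | cons dep deps ih =>
    intro v nf
    by_cases hc : dep ∈ module_set ∧ dep ∉ v
    · obtain ⟨d, heq, hd, hm⟩ := ih (v ++ [dep]) (nf ++ [dep])
      refine ⟨dep :: d, ?_, ?_, ?_⟩
      · simpa [visitDep, hc, PySem.Set.add_of_not_mem hc.2] using heq
      · intro x hx
        rcases List.mem_cons.mp hx with rfl | hx
        · exact hc
        · have := hd x hx; simp only [List.mem_append, List.mem_cons, List.not_mem_nil, or_false] at this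
          exact ⟨this.1, fun hv => this.2 (Or.inl hv)⟩
      · intro x
        have := hm x
        simp only [List.mem_append, List.mem_cons, List.not_mem_nil, or_false] at this ⊢
        constructor
        · rintro (hv | rfl | hx)
          · exact Or.inl hv
          · exact Or.inr ⟨hc.1, Or.inl rfl⟩
          · rcases (this.mp (Or.inr hx)) with ((h | h) | h)
            · exact Or.inl h
            · exact Or.inr ⟨by rw [h]; exact hc.1, Or.inl h⟩
            · exact Or.inr ⟨h.1, Or.inr h.2⟩
        · rintro (hv | ⟨hM, rfl | hx⟩)
          · exact Or.inl hv
          · exact Or.inr (Or.inl rfl)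
          · rcases (this.mpr (Or.inr ⟨hM, hx⟩)) with ((h | h) | h)
            · exact Or.inl h
            · exact Or.inr (Or.inl h)
            · exact Or.inr (Or.inr h)
    · obtain ⟨d, heq, hd, hm⟩ := ih v nf
      refine ⟨d, by simpa [visitDep, hc] using heq, hd, ?_⟩
      intro x
      have := hm x
      simp only [List.mem_cons] at this ⊢
      constructor
      · rintro h
        rcases this.mp h with h' | ⟨hM, hx⟩
        · exact Or.inl h'
        · exact Or.inr ⟨hM, Or.inr hx⟩
      · rintro (hv | ⟨hM, rfl | hx⟩)
        · exact Or.inl hv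
        · rcases not_and_or.mp hc with h | h
          · exact absurd hM h
          · exact Or.inl (not_not.mp h)
        · exact this.mpr (Or.inr ⟨hM, hx⟩)

theorem stepA_spec (graph : List (String × List String)) (module_set : List String)
    (frontier : List String) :
    ∀ (v : PySem.Set String) (nf : List String),
      ∃ d, frontier.foldl (visitMod graph module_set) (v, nf) = (v ++ d, nf ++ d) ∧
        (∀ x ∈ d, x ∈ module_set ∧ x ∉ v) ∧
        (∀ x, (x ∈ v ∨ x ∈ d) ↔ (x ∈ v ∨ (x ∈ module_set ∧ ∃ m ∈ frontier, x ∈ depGet graph m))) := by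
  induction frontier with
  | nil => intro v nf; exact ⟨[], by simp⟩
  | cons m f ih =>
    intro v nf
    obtain ⟨d1, heq1, hd1, hm1⟩ := visitMod_spec module_set (depGet graph m) v nf
    obtain ⟨d2, heq2, hd2, hm2⟩ := ih (v ++ d1) (nf ++ d1)
    refine ⟨d1 ++ d2, ?_, ?_, ?_⟩
    · simp only [List.foldl_cons]
      rw [show visitMod graph module_set (v, nf) m = (v ++ d1, nf ++ d1) from heq1, heq2,
        List.append_assoc, List.append_assoc]
    · intro x hx
      rcases List.mem_append.mp hx with hx | hx
      · exact hd1 x hx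
      · have := hd2 x hx
        exact ⟨this.1, fun hv => this.2 (List.mem_append.mpr (Or.inl hv))⟩
    · intro x
      have h1 := hm1 x
      have h2 := hm2 x
      simp only [List.mem_append, List.mem_cons] at h1 h2 ⊢
      constructor
      · rintro (hv | (hx | hx))
        · exact Or.inl hv
        · rcases h1.mp (Or.inr hx) with h | h
          · exact Or.inl h
          · exact Or.inr ⟨h.1, m, Or.inl rfl, h.2⟩
        · rcases h2.mp (Or.inr hx) with (h | h) | h
          · exact Or.inl h
          · rcases h1.mp (Or.inr h) with h' | h'
            · exact Or.inl h'
            · exact Or.inr ⟨h'.1, m, Or.inl rfl, h'.2⟩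
          · obtain ⟨hM, m', hm', hnb⟩ := h
            exact Or.inr ⟨hM, m', Or.inr hm', hnb⟩
      · rintro (hv | ⟨hM, m', rfl | hm', hnb⟩)
        · exact Or.inl hv
        · rcases h1.mpr (Or.inr ⟨hM, hnb⟩) with h | h
          · exact Or.inl h
          · exact Or.inr (Or.inl h)
        · rcases h2.mpr (Or.inr ⟨hM, m', hm', hnb⟩) with (h | h) | h
          · exact Or.inl h
          · exact Or.inr (Or.inl h)
          · exact Or.inr (Or.inr h)

theorem filter_length_le {α : Type} (l : List α) (p q : α → Bool)
    (himp : ∀ x ∈ l, p x = true → q x = true) :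
    (l.filter p).length ≤ (l.filter q).length := by
  induction l with
  | nil => simp
  | cons a l ih =>
    have ih' := ih (fun x hx => himp x (List.mem_cons_of_mem a hx))
    rcases hp : p a with - | -
    · rcases hq : q a with - | - <;> simp [hp, hq] <;> omega
    · simp [hp, himp a List.mem_cons_self hp]; omega

theorem filter_length_lt {α : Type} (l : List α) (p q : α → Bool)
    (himp : ∀ x ∈ l, p x = true → q x = true) (y : α) (hy : y ∈ l) (hqy : q y = true)
    (hpy : p y = false) : (l.filter p).length < (l.filter q).length := by
  induction l with
  | nil => simp at hy
  | cons a l ih =>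
    have h' := fun x hx => himp x (List.mem_cons_of_mem a hx)
    rcases List.mem_cons.mp hy with rfl | hy'
    · have := filter_length_le l p q h'
      simp [hpy, hqy]; omega
    · have := ih h' hy'
      rcases hp : p a with - | -
      · rcases hq : q a with - | - <;> simp [hp, hq] <;> omega
      · simp [hp, himp a List.mem_cons_self hp]; omega

-- 'while frontier:' of A
def loopA (graph : List (String × List String)) (module_set : List String)
    (visited : PySem.Set String) (frontier : List String) (depth : Int) : Int :=
  if h : frontier = [] then depth
  else
    let st := stepA graph module_set visited frontier
    loopA graph module_set st.1 st.2 (if st.2 = [] then depth else depth + 1)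
termination_by ((module_set.filter (fun m => decide (m ∉ visited))).length, frontier.length)
decreasing_by
  obtain ⟨d, heq, hd, -⟩ := stepA_spec graph module_set frontier visited []
  simp only [stepA] at *
  simp only [heq]
  rcases d with - | ⟨y, d'⟩
  · simp only [List.append_nil]
    exact Prod.Lex.right _ (by simpa using List.length_pos_of_ne_nil h)
  · left
    refine filter_length_lt module_set _ _ ?_ y ((hd y (by simp)).1) (by simp [(hd y (by simp)).2]) ?_
    · intro x _ hpx
      simp only [decide_eq_true_eq] at hpx ⊢
      intro hxv; exact hpx (by simp [hxv])
    · simp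

def compute_max_import_depth_py (graph : List (String × List String)) (module_set : List String) : Int :=
  module_set.foldl (fun max_depth start => max max_depth (loopA graph module_set [start] [start] 0)) 0

-- ===== PORT B =====
-- the set comprehension: {dep for mod in visited for dep in graph.get(mod, set()) if dep in module_set and dep not in visited}
def satB (graph : List (String × List String)) (module_set : List String)
    (visited : PySem.Set String) : PySem.Set String :=
  visited.foldl (fun acc m =>
      (depGet graph m).foldl (fun acc dep =>
          if dep ∈ module_set ∧ dep ∉ visited then PySem.Set.add acc dep else acc) acc)
    PySem.Set.empty

-- 'for _ in range(len(module_set)): … if not new: break …'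
def loopB (graph : List (String × List String)) (module_set : List String)
    (visited : PySem.Set String) (depth : Int) : Nat → Int
  | 0 => depth
  | k + 1 =>
    let nw := satB graph module_set visited
    if nw = [] then depth
    else loopB graph module_set (PySem.Set.union visited nw) (depth + 1) k

def compute_max_import_depth_py_alt (graph : List (String × List String)) (module_set : List String) : Int :=
  module_set.foldl
    (fun max_depth start => max max_depth (loopB graph module_set [start] 0 module_set.length)) 0

-- ===== PRECONDITION & SPEC =====
def Spec_compute_max_import_depth_py (graph : List (String × List String)) (module_set : List String) (out : Int) : Prop := out = compute_max_import_depth_py_alt graph module_set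
instance (graph : List (String × List String)) (module_set : List String) (out : Int) : Decidable (Spec_compute_max_import_depth_py graph module_set out) := by unfold Spec_compute_max_import_depth_py; infer_instance

-- ===== CLAIM (what is proved, stated in full; the proofs are below) =====
def Claim_equal_compute_max_import_depth_py : Prop := ∀ (graph : List (String × List String)) (module_set : List String), Dom_compute_max_import_depth_py graph module_set → Spec_compute_max_import_depth_py graph module_set (compute_max_import_depth_py graph module_set)

-- ===== LEMMAS AND PROOFS =====
theorem satB_inner_mem (module_set : List String) (visited : PySem.Set String)
    (deps : List String) (x : String) :
    ∀ acc : PySem.Set String,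
      x ∈ deps.foldl (fun acc dep =>
          if dep ∈ module_set ∧ dep ∉ visited then PySem.Set.add acc dep else acc) acc ↔
        x ∈ acc ∨ (x ∈ module_set ∧ x ∉ visited ∧ x ∈ deps) := by
  induction deps with
  | nil => intro acc; simp
  | cons dep deps ih =>
    intro acc
    by_cases hc : dep ∈ module_set ∧ dep ∉ visited
    · rw [List.foldl_cons, if_pos hc, ih]
      simp only [PySem.Set.mem_add, List.mem_cons]
      constructor
      · rintro ((ha | rfl) | h)
        · exact Or.inl ha
        · exact Or.inr ⟨hc.1, hc.2, Or.inl rfl⟩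
        · exact Or.inr ⟨h.1, h.2.1, Or.inr h.2.2⟩
      · rintro (ha | ⟨hM, hv, rfl | hx⟩)
        · exact Or.inl (Or.inl ha)
        · exact Or.inl (Or.inr rfl)
        · exact Or.inr ⟨hM, hv, hx⟩
    · rw [List.foldl_cons, if_neg hc, ih]
      simp only [List.mem_cons]
      constructor
      · rintro (ha | h)
        · exact Or.inl ha
        · exact Or.inr ⟨h.1, h.2.1, Or.inr h.2.2⟩
      · rintro (ha | ⟨hM, hv, rfl | hx⟩)
        · exact Or.inl ha
        · exact absurd ⟨hM, hv⟩ hc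
        · exact Or.inr ⟨hM, hv, hx⟩

theorem satB_mem (graph : List (String × List String)) (module_set : List String)
    (visited : PySem.Set String) (x : String) :
    x ∈ satB graph module_set visited ↔
      (x ∈ module_set ∧ x ∉ visited ∧ ∃ m ∈ visited, x ∈ depGet graph m) := by
  unfold satB
  suffices h : ∀ (l : List String) (acc : PySem.Set String),
      x ∈ l.foldl (fun acc m =>
        (depGet graph m).foldl (fun acc dep =>
          if dep ∈ module_set ∧ dep ∉ visited then PySem.Set.add acc dep else acc) acc) acc ↔
      x ∈ acc ∨ (x ∈ module_set ∧ x ∉ visited ∧ ∃ m ∈ l, x ∈ depGet graph m) by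
    rw [h visited PySem.Set.empty]
    simp [PySem.Set.empty]
  intro l
  induction l with
  | nil => intro acc; simp
  | cons m l ih =>
    intro acc
    rw [List.foldl_cons, ih, satB_inner_mem]
    simp only [List.mem_cons]
    constructor
    · rintro ((ha | ⟨hM, hv, hx⟩) | ⟨hM, hv, m', hm', hx⟩)
      · exact Or.inl ha
      · exact Or.inr ⟨hM, hv, m, Or.inl rfl, hx⟩
      · exact Or.inr ⟨hM, hv, m', Or.inr hm', hx⟩
    · rintro (ha | ⟨hM, hv, m', rfl | hm', hx⟩)
      · exact Or.inl (Or.inl ha)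
      · exact Or.inl (Or.inr ⟨hM, hv, hx⟩)
      · exact Or.inr ⟨hM, hv, m', hm', hx⟩

-- the main lockstep lemma: A's layered loop equals B's saturation loop
theorem loop_eq (graph : List (String × List String)) (module_set : List String) :
    ∀ (k : Nat) (v : PySem.Set String) (f : List String) (w : PySem.Set String) (depth : Int),
      (∀ x, x ∈ v ↔ x ∈ w) →
      (∀ x ∈ f, x ∈ v) →
      (∀ m x, m ∈ v → m ∉ f → x ∈ depGet graph m → x ∈ module_set → x ∈ v) →
      (module_set.filter (fun m => decide (m ∉ v))).length ≤ k →
      loopA graph module_set v f depth = loopB graph module_set w depth k := by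
  intro k
  induction k with
  | zero =>
    intro v f w depth hvw hfv hcl hcount
    have hnil : module_set.filter (fun m => decide (m ∉ v)) = [] :=
      List.eq_nil_of_length_eq_zero (Nat.le_zero.mp hcount)
    have hall : ∀ m ∈ module_set, m ∈ v := by
      intro m hm
      by_contra hmv
      have : m ∈ ([] : List String) := hnil ▸ List.mem_filter.mpr ⟨hm, by simpa using hmv⟩
      simp at this
    show loopA graph module_set v f depth = depth
    by_cases hf : f = []
    · rw [loopA, dif_pos hf]
    · obtain ⟨d, heq, hd, -⟩ := stepA_spec graph module_set f v []
      have hd0 : d = [] := by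
        rcases d with - | ⟨y, d'⟩
        · rfl
        · exact absurd (hall y (hd y List.mem_cons_self).1) (hd y List.mem_cons_self).2
      have hst : stepA graph module_set v f = (v, []) := by
        rw [stepA, heq, hd0]; simp
      rw [loopA, dif_neg hf]
      simp only [hst]
      rw [loopA]
      simp
  | succ k ih =>
    intro v f w depth hvw hfv hcl hcount
    by_cases hf : f = []
    · have hnw : satB graph module_set w = [] := by
        refine List.eq_nil_iff_forall_not_mem.mpr (fun x hx => ?_)
        obtain ⟨hM, hxw, m, hmw, hnb⟩ := (satB_mem graph module_set w x).mp hx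
        exact hxw ((hvw x).mp (hcl m x ((hvw m).mpr hmw) (by simp [hf]) hnb hM))
      rw [loopA, dif_pos hf, loopB]
      simp [hnw]
    · obtain ⟨d, heq, hd, hm⟩ := stepA_spec graph module_set f v []
      have hdset : ∀ x, x ∈ d ↔ (x ∈ module_set ∧ x ∉ v ∧ ∃ m ∈ f, x ∈ depGet graph m) := by
        intro x
        constructor
        · intro hx
          obtain ⟨hM, hxv⟩ := hd x hx
          rcases (hm x).mp (Or.inr hx) with h | h
          · exact absurd h hxv
          · exact ⟨hM, hxv, h.2⟩
        · rintro ⟨hM, hxv, hex⟩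
          rcases (hm x).mpr (Or.inr ⟨hM, hex⟩) with h | h
          · exact absurd h hxv
          · exact h
      have hnwset : ∀ x, x ∈ satB graph module_set w ↔ x ∈ d := by
        intro x
        rw [satB_mem, hdset]
        constructor
        · rintro ⟨hM, hxw, m, hmw, hnb⟩
          have hxv : x ∉ v := fun hv => hxw ((hvw x).mp hv)
          by_cases hmf : m ∈ f
          · exact ⟨hM, hxv, m, hmf, hnb⟩
          · exact absurd ((hvw x).mp (hcl m x ((hvw m).mpr hmw) hmf hnb hM)) hxw
        · rintro ⟨hM, hxv, m, hmf, hnb⟩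
          exact ⟨hM, fun hw => hxv ((hvw x).mpr hw), m, (hvw m).mp (hfv m hmf), hnb⟩
      have hst : stepA graph module_set v f = (v ++ d, d) := by
        rw [stepA, heq]; simp
      by_cases hd0 : d = []
      · have hnw : satB graph module_set w = [] :=
          List.eq_nil_iff_forall_not_mem.mpr (fun x hx => by
            simpa [hd0] using (hnwset x).mp hx)
        rw [loopA, dif_neg hf, loopB]
        simp only [hst, hnw, hd0]
        rw [loopA]
        simp
      · have hnw : satB graph module_set w ≠ [] := by
          obtain ⟨y, hy⟩ := List.exists_mem_of_ne_nil d hd0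
          exact fun hsat => by simpa [hsat] using (hnwset y).mpr hy
        rw [loopA, dif_neg hf, loopB]
        simp only [hst, if_neg hd0, if_neg hnw]
        obtain ⟨y, hy⟩ := List.exists_mem_of_ne_nil d hd0
        refine ih (v ++ d) d (PySem.Set.union w (satB graph module_set w)) (depth + 1) ?_ ?_ ?_ ?_
        · intro x
          rw [PySem.Set.mem_union, List.mem_append, hnwset, hvw]
        · intro x hx
          exact List.mem_append.mpr (Or.inr hx)
        · intro m x hmvd hmd hnb hM
          rcases List.mem_append.mp hmvd with hmv | hmd'
          · by_cases hmf : m ∈ f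
            · by_cases hxv : x ∈ v
              · exact List.mem_append.mpr (Or.inl hxv)
              · exact List.mem_append.mpr (Or.inr ((hdset x).mpr ⟨hM, hxv, m, hmf, hnb⟩))
            · exact List.mem_append.mpr (Or.inl (hcl m x hmv hmf hnb hM))
          · exact absurd hmd' hmd
        · have hlt : (module_set.filter (fun m => decide (m ∉ v ++ d))).length <
              (module_set.filter (fun m => decide (m ∉ v))).length := by
            refine filter_length_lt module_set _ _ ?_ y ((hd y hy).1) (by simp [(hd y hy).2])
              (by simp [List.mem_append.mpr (Or.inr hy)])
            intro x hx hpx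
            simp only [decide_eq_true_eq, List.mem_append] at hpx ⊢
            exact fun hxv => hpx (Or.inl hxv)
          omega

-- ===== VERDICT (by name: the statement is the Claim_ definition above) =====
theorem compute_max_import_depth_py_spec : Claim_equal_compute_max_import_depth_py := by
  intro graph module_set _
  unfold Spec_compute_max_import_depth_py
  unfold compute_max_import_depth_py compute_max_import_depth_py_alt
  refine PySem.List.foldl_congr_mem _ _ _ _ ?_
  intro acc start hs
  congr 1
  refine loop_eq graph module_set module_set.length [start] [start] [start] 0
    (fun x => Iff.rfl) (fun x hx => hx) (fun m x hm hnm _ _ => absurd hm hnm) ?_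
  calc (module_set.filter _).length ≤ module_set.length := List.length_filter_le _ _
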